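-- pv_equiv track=rewrite | github.com/Beloman-bolobol999/Theory-of-Computation- | Turing_Machine_Sim.py | accept_even_ones_even_zeros
-- ===== SOURCE A (Python) =====
-- def accept_even_ones_even_zeros(string):
--     state = 0
--     for symbol in string:
--         if state == 0:
--             if symbol == '0':
--                state = 1
--             elif symbol == '1':
--                 state = 2
--             else:
--                 return False
--         elif state == 1:
--             if symbol == '0':
--                 state = 2
--             elif symbol == '1':
--                 state = 1
--             else:
--                 return False
--         elif state == 2:
--             if symbol == '0':
--                 state = 1
--             elif symbol == '1':
--                 state = 2
--             else:
--                 return False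
--         elif state == 3:
--             if symbol == '0':
--                 state = 2
--             elif symbol == '1':
--                 state = 1
--             else:
--                 return False
--     return state == 2
-- ===== SOURCE B (Python) =====
-- def accept_even_ones_even_zeros(string):
--     if len(string) == 0:
--         return False
--     if any(c not in ('0', '1') for c in string):
--         return False
--     return string.count('0') % 2 == 0
-- ===== Notes on version B (the rewrite author's own statement) =====
-- stated objective: simpler
-- what changed: Replaced the explicit 4-state DFA stepping loop with a direct characterization: the string is nonempty, every symbol is a binary digit, and the number of zero symbols is even (the one symbols never change the outcome).
import Mathlib
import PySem

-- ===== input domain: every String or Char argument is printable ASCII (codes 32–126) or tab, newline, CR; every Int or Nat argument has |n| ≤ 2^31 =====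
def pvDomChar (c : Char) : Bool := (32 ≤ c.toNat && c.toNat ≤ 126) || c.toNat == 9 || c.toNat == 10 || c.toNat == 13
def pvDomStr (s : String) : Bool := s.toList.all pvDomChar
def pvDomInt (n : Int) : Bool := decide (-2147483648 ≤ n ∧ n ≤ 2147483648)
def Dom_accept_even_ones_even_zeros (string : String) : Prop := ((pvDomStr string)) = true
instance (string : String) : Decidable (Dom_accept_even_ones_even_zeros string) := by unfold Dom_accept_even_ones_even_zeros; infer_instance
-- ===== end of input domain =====

-- B replaces A's explicit 4-state DFA loop with a direct check: nonempty, symbols in {0,1}, even count of '0's (simpler).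
-- ===== PORT A =====
-- the for-loop with early 'return False': structural recursion over the characters carrying the state
def pvALoop (state : Int) : List Char → Bool
  | [] => state == 2
  | c :: rest =>
    if state == 0 then
      if c == '0' then pvALoop 1 rest
      else if c == '1' then pvALoop 2 rest
      else false
    else if state == 1 then
      if c == '0' then pvALoop 2 rest
      else if c == '1' then pvALoop 1 rest
      else false
    else if state == 2 then
      if c == '0' then pvALoop 1 rest
      else if c == '1' then pvALoop 2 rest
      else false
    else if state == 3 then
      if c == '0' then pvALoop 2 rest
      else if c == '1' then pvALoop 1 rest
      else false
    else pvALoop state rest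

def accept_even_ones_even_zeros (string : String) : Bool :=
  pvALoop 0 string.toList

-- ===== PORT B =====
def accept_even_ones_even_zeros_alt (string : String) : Bool :=
  if string.toList.length = 0 then false
  else if string.toList.any (fun c => !(c == '0' || c == '1')) then false
  else string.toList.count '0' % 2 == 0

-- ===== PRECONDITION & SPEC =====
def Spec_accept_even_ones_even_zeros (string : String) (out : Bool) : Prop := out = accept_even_ones_even_zeros_alt string
instance (string : String) (out : Bool) : Decidable (Spec_accept_even_ones_even_zeros string out) := by unfold Spec_accept_even_ones_even_zeros; infer_instance

-- ===== CLAIM (what is proved, stated in full; the proofs are below) =====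
def Claim_equal_accept_even_ones_even_zeros : Prop := ∀ (string : String), Dom_accept_even_ones_even_zeros string → Spec_accept_even_ones_even_zeros string (accept_even_ones_even_zeros string)

-- ===== LEMMAS AND PROOFS =====

-- ===== VERDICT (by name: the statement is the Claim_ definition above) =====
-- invariant of A's loop from a live state (1 or 2): accepted iff all symbols valid and
-- parity of remaining '0's matches the state (state 2 = even, state 1 = odd)
theorem pvALoop_inv (l : List Char) : ∀ s : Int, s = 1 ∨ s = 2 →
    pvALoop s l = (l.all (fun c => c == '0' || c == '1') &&
      ((s == 2) == decide (l.count '0' % 2 = 0))) := by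
  induction l with
  | nil => rintro s (rfl | rfl) <;> simp [pvALoop]
  | cons c rest ih =>
    rintro s (rfl | rfl) <;>
    · by_cases h0 : c = '0' <;> by_cases h1 : c = '1' <;>
        simp [pvALoop, h0, h1, ih 1 (Or.inl rfl), ih 2 (Or.inr rfl),
          Bool.and_assoc] <;>
        rcases Nat.mod_two_eq_zero_or_one (rest.count '0') with h | h <;>
        simp [h] <;> omega

theorem pv_all_not_any (l : List Char) :
    (l.all fun c => c == '0' || c == '1') = !decide (∃ x ∈ l, ¬x = '0' ∧ ¬x = '1') := by
  induction l with
  | nil => simp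
  | cons a t ih => by_cases ha : a = '0' <;> by_cases hb : a = '1' <;> simp [ha, hb, ih]

theorem accept_even_ones_even_zeros_spec : Claim_equal_accept_even_ones_even_zeros := by
  intro s _
  unfold Spec_accept_even_ones_even_zeros accept_even_ones_even_zeros accept_even_ones_even_zeros_alt
  cases hl : s.toList with
  | nil => simp [pvALoop]
  | cons c rest =>
    by_cases h0 : c = '0' <;> by_cases h1 : c = '1' <;>
      simp [pvALoop, h0, h1, pvALoop_inv rest 1 (Or.inl rfl), pvALoop_inv rest 2 (Or.inr rfl)] <;>
      rcases Nat.mod_two_eq_zero_or_one (rest.count '0') with h | h <;>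
      first
        | (rw [h0] at h1; exact absurd h1 (by decide))
        | (simp [h] <;> omega)
        | (have h2 : (rest.count '0' + 1) % 2 = 0 := by omega
           simp [h, h2, pv_all_not_any])
        | simp [h, pv_all_not_any]
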